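-- pv_equiv track=rewrite | github.com/EdwardZehuaZhang/3d-printing-monorepo | rhino8-internal-wire/Libraries/wire_router/core.py | _approach_direction
-- ===== SOURCE A (Python) =====
-- from typing import Dict, Iterable, Iterator, List, Optional, Sequence, Set, Tuple
--
-- GridIndex = Tuple[int, int, int]
--
-- def _approach_direction(
--     path: Sequence[GridIndex],
--     from_end: bool,
--     depth: int = 3,
-- ) -> Optional[GridIndex]:
--     """Return a unit-step direction vector describing how *path* approaches
--     the start (from_end=False) or end (from_end=True) of the path.
--
--     Averages up to *depth* step directions then quantises to the dominant
--     axis.  Returns ``None`` if the path is too short.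
--     """
--     if len(path) < 2:
--         return None
--
--     if from_end:
--         segment = list(reversed(path[-min(depth + 1, len(path)):]))
--     else:
--         segment = list(path[:min(depth + 1, len(path))])
--
--     dx, dy, dz = 0, 0, 0
--     for a, b in zip(segment[:-1], segment[1:]):
--         dx += b[0] - a[0]
--         dy += b[1] - a[1]
--         dz += b[2] - a[2]
--
--     # Quantise to the dominant axis (unit step).
--     adx, ady, adz = abs(dx), abs(dy), abs(dz)
--     dominant = max(adx, ady, adz)
--     if dominant == 0:
--         return None
--     if adx == dominant:
--         return (1 if dx > 0 else -1, 0, 0)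
--     if ady == dominant:
--         return (0, 1 if dy > 0 else -1, 0)
--     return (0, 0, 1 if dz > 0 else -1)
-- ===== SOURCE B (Python) =====
-- def _quantise(dx, dy, dz):
--     """Quantise a displacement to its dominant-axis unit step (None if zero)."""
--     adx, ady, adz = abs(dx), abs(dy), abs(dz)
--     dominant = max(adx, ady, adz)
--     if dominant == 0:
--         return None
--     if adx == dominant:
--         return (1 if dx > 0 else -1, 0, 0)
--     if ady == dominant:
--         return (0, 1 if dy > 0 else -1, 0)
--     return (0, 0, 1 if dz > 0 else -1)
--
--
-- def _approach_direction(path, from_end, depth=3):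
--     """Dominant-axis approach direction at a path endpoint.
--
--     The sum of up to *depth* step differences telescopes, so only the two
--     endpoints of the window are needed -- no loop over the steps.
--     """
--     if len(path) < 2:
--         return None
--     k = min(depth + 1, len(path))
--     a, b = (path[-1], path[-k]) if from_end else (path[0], path[k - 1])
--     return _quantise(b[0] - a[0], b[1] - a[1], b[2] - a[2])
-- ===== Notes on version B (the rewrite author's own statement) =====
-- stated objective: simpler
-- what changed: B drops A's per-step difference loop over zipped reversed slices: the summed step differences telescope, so B reads the two endpoint points of the window directly and quantises their componentwise difference; Pre_ excludes negative depth, outside the parameter's natural domain, where A's value is an accident of Python negative-slice semantics and B's direct indexing raises IndexError for large negative depth.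
-- outside the precondition, e.g. on _approach_direction([(0, 0, 0), (1, 0, 0)], False, -1): A returns None, B returns (1, 0, 0); on _approach_direction([(0, 0, 0), (1, 0, 0)], False, -4): A returns None, B raises IndexError
import Mathlib
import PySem

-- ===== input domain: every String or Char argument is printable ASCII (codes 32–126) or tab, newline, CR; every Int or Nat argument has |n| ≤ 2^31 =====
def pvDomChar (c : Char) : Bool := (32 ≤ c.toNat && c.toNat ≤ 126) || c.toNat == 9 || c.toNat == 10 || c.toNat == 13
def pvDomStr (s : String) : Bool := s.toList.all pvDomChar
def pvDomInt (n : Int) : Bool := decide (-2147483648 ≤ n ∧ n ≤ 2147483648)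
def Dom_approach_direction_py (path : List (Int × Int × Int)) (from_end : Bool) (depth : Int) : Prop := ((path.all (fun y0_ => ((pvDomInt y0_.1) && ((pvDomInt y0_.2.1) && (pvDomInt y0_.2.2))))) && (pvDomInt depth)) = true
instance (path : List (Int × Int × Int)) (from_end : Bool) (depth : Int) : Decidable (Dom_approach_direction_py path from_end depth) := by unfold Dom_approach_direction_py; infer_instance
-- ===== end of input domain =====

-- B replaces A's per-step difference loop by the telescoped endpoint difference (no loop); equal on all inputs with nonnegative depth.

-- ===== PORT A =====
-- the loop body of A's 'for a, b in zip(segment[:-1], segment[1:])'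
def pvStepA (acc : Int × Int × Int) (ab : (Int × Int × Int) × (Int × Int × Int)) : Int × Int × Int :=
  (acc.1 + (ab.2.1 - ab.1.1), acc.2.1 + (ab.2.2.1 - ab.1.2.1), acc.2.2 + (ab.2.2.2 - ab.1.2.2))

def approach_direction_py (path : List (Int × Int × Int)) (from_end : Bool) (depth : Int) : Option (Int × Int × Int) :=
  if path.length < 2 then none
  else
    let segment : List (Int × Int × Int) :=
      if from_end then
        (PySem.List.slice path (some (-(min (depth + 1) (path.length : Int)))) none).reverse
      else
        PySem.List.slice path none (some (min (depth + 1) (path.length : Int)))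
    let d : Int × Int × Int :=
      ((PySem.List.slice segment none (some (-1))).zip
        (PySem.List.slice segment (some 1) none)).foldl pvStepA (0, 0, 0)
    if max (max |d.1| |d.2.1|) |d.2.2| = 0 then none
    else if |d.1| = max (max |d.1| |d.2.1|) |d.2.2| then some (if d.1 > 0 then 1 else -1, 0, 0)
    else if |d.2.1| = max (max |d.1| |d.2.1|) |d.2.2| then some (0, if d.2.1 > 0 then 1 else -1, 0)
    else some (0, 0, if d.2.2 > 0 then 1 else -1)

-- ===== PORT B =====
-- Source B's helper _quantise
def pvQuantB (dx dy dz : Int) : Option (Int × Int × Int) :=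
  if max (max |dx| |dy|) |dz| = 0 then none
  else if |dx| = max (max |dx| |dy|) |dz| then some (if dx > 0 then 1 else -1, 0, 0)
  else if |dy| = max (max |dx| |dy|) |dz| then some (0, if dy > 0 then 1 else -1, 0)
  else some (0, 0, if dz > 0 then 1 else -1)

-- indexing is exact under Pre_ (all four indices are in range there)
def approach_direction_py_alt (path : List (Int × Int × Int)) (from_end : Bool) (depth : Int) : Option (Int × Int × Int) :=
  if path.length < 2 then none
  else
    let k : Int := min (depth + 1) (path.length : Int)
    let a := if from_end then PySem.List.pyGetD path (-1) (0, 0, 0)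
             else PySem.List.pyGetD path 0 (0, 0, 0)
    let b := if from_end then PySem.List.pyGetD path (-k) (0, 0, 0)
             else PySem.List.pyGetD path (k - 1) (0, 0, 0)
    pvQuantB (b.1 - a.1) (b.2.1 - a.2.1) (b.2.2 - a.2.2)

-- ===== PRECONDITION & SPEC =====
-- Pre_ restricts depth to its natural nonnegative domain (default 3): for negative depth, A's value
-- is an accident of Python negative-slice semantics and B's direct indexing can raise IndexError.
def Pre_approach_direction_py (path : List (Int × Int × Int)) (from_end : Bool) (depth : Int) : Prop := 0 ≤ depth
instance (path : List (Int × Int × Int)) (from_end : Bool) (depth : Int) : Decidable (Pre_approach_direction_py path from_end depth) := by unfold Pre_approach_direction_py; infer_instance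
def pvWitness_approach_direction_py : (List (Int × Int × Int)) × Bool × Int := ([(0, 0, 0), (1, 0, 0), (1, 2, 0)], true, 3)

def Spec_approach_direction_py (path : List (Int × Int × Int)) (from_end : Bool) (depth : Int) (out : Option (Int × Int × Int)) : Prop := out = approach_direction_py_alt path from_end depth
instance (path : List (Int × Int × Int)) (from_end : Bool) (depth : Int) (out : Option (Int × Int × Int)) : Decidable (Spec_approach_direction_py path from_end depth out) := by unfold Spec_approach_direction_py; infer_instance

-- ===== CLAIM (what is proved, stated in full; the proofs are below) =====
def Claim_equal_approach_direction_py : Prop := ∀ (path : List (Int × Int × Int)) (from_end : Bool) (depth : Int), Dom_approach_direction_py path from_end depth → Pre_approach_direction_py path from_end depth → Spec_approach_direction_py path from_end depth (approach_direction_py path from_end depth)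

-- ===== LEMMAS AND PROOFS =====

-- zipping segment[:-1] with segment[1:] is the same pairs as zipping segment with its tail
theorem pvZipDT {α : Type} : ∀ (seg : List α), seg.dropLast.zip seg.tail = seg.zip seg.tail
  | [] => rfl
  | [_] => rfl
  | x :: y :: t => by
    simp only [List.dropLast_cons₂, List.tail_cons, List.zip_cons_cons]
    have h := pvZipDT (y :: t)
    simpa using h

-- the per-step difference sum telescopes to last-minus-first
theorem pvTele : ∀ (rest : List (Int × Int × Int)) (x acc : Int × Int × Int),
    List.foldl pvStepA acc ((x :: rest).zip rest)
      = (acc.1 + ((rest.getLastD x).1 - x.1),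
         acc.2.1 + ((rest.getLastD x).2.1 - x.2.1),
         acc.2.2 + ((rest.getLastD x).2.2 - x.2.2))
  | [], x, acc => by simp
  | y :: t, x, acc => by
    simp only [List.zip_cons_cons, List.foldl_cons, List.getLastD_cons]
    rw [pvTele t y (pvStepA acc (x, y))]
    simp only [pvStepA]
    refine Prod.ext (by ring) (Prod.ext (by ring) (by ring))

-- A's fold over a segment, in closed form: last element minus first element
theorem pvFoldA (seg : List (Int × Int × Int)) :
    ((PySem.List.slice seg none (some (-1))).zip
        (PySem.List.slice seg (some 1) none)).foldl pvStepA (0, 0, 0)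
      = ((seg.getLastD (0,0,0)).1 - (seg.headD (0,0,0)).1,
         (seg.getLastD (0,0,0)).2.1 - (seg.headD (0,0,0)).2.1,
         (seg.getLastD (0,0,0)).2.2 - (seg.headD (0,0,0)).2.2) := by
  rw [PySem.List.slice_to_neg_one, PySem.List.slice_from_one]
  cases seg with
  | nil => simp
  | cons x rest =>
    rw [pvZipDT]
    simpa [List.getLast?_cons] using pvTele rest x (0, 0, 0)

theorem pvGetLast?_drop {α : Type} (l : List α) (m : Nat) (hm : m < l.length) :
    (l.drop m).getLast? = l[l.length - 1]? := by
  rw [List.getLast?_eq_getElem?, List.getElem?_drop, List.length_drop]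
  congr 1
  omega

theorem pvGetLast?_take {α : Type} (l : List α) (t : Nat) (h1 : 1 ≤ t) (h2 : t ≤ l.length) :
    (l.take t).getLast? = l[t - 1]? := by
  rw [List.getLast?_eq_getElem?, List.length_take]
  have h3 : min t l.length - 1 = t - 1 := by omega
  rw [h3, List.getElem?_take_of_lt (by omega)]

theorem pvHead?_take {α : Type} (l : List α) (t : Nat) (h1 : 1 ≤ t) :
    (l.take t).head? = l[0]? := by
  cases l with
  | nil => simp
  | cons x xs =>
    cases t with
    | zero => omega
    | succ t => simp

theorem pvEndpointsRev (path : List (Int × Int × Int)) (m : Nat) (hm : m < path.length) :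
    ((path.drop m).reverse).headD ((0:Int),(0:Int),(0:Int)) = path[path.length - 1]'(by omega) ∧
    ((path.drop m).reverse).getLastD ((0:Int),(0:Int),(0:Int)) = path[m] := by
  constructor
  · rw [List.headD_eq_head?_getD, List.head?_reverse, pvGetLast?_drop _ _ hm,
        List.getElem?_eq_getElem (by omega)]
    rfl
  · rw [List.getLastD_eq_getLast?, List.getLast?_reverse, List.head?_drop,
        List.getElem?_eq_getElem hm]
    rfl

-- ===== VERDICT (by name: the statement is the Claim_ definition above) =====
theorem approach_direction_py_spec : Claim_equal_approach_direction_py := by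
  intro path fe depth _ hpre
  unfold Pre_approach_direction_py at hpre
  unfold Spec_approach_direction_py approach_direction_py approach_direction_py_alt
  by_cases h2 : path.length < 2
  · simp only [if_pos h2]
  · simp only [if_neg h2]
    have hkN : min (depth + 1) ((path.length:Int)) ≤ (path.length:Int) := min_le_right _ _
    have hk1 : 1 ≤ min (depth + 1) ((path.length:Int)) := by
      have : (2:Int) ≤ (path.length:Int) := by exact_mod_cast Nat.le_of_not_lt h2
      omega
    cases fe
    · -- from_end = false
      simp only [Bool.false_eq_true, if_false]
      rw [pvFoldA]
      rw [PySem.List.slice_to path (by omega)]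
      have hhead : (path.take (min (depth + 1) ((path.length:Int))).toNat).headD ((0:Int),(0:Int),(0:Int)) = path[0]'(by omega) := by
        rw [List.headD_eq_head?_getD, pvHead?_take _ _ (by omega), List.getElem?_eq_getElem (by omega)]
        rfl
      have hlast : (path.take (min (depth + 1) ((path.length:Int))).toNat).getLastD ((0:Int),(0:Int),(0:Int)) = path[(min (depth + 1) ((path.length:Int))).toNat - 1]'(by omega) := by
        rw [List.getLastD_eq_getLast?, pvGetLast?_take _ _ (by omega) (by omega), List.getElem?_eq_getElem (by omega)]
        rfl
      rw [hhead, hlast]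
      rw [PySem.List.pyGetD_eq_getElem path (i := min (depth + 1) ((path.length:Int)) - 1) ((0:Int),(0:Int),(0:Int)) (by omega) (by omega),
          PySem.List.pyGetD_eq_getElem path (i := 0) ((0:Int),(0:Int),(0:Int)) (by omega) (by omega)]
      have hh1 : ((0:Int)).toNat = 0 := rfl
      have hh2 : ((min (depth + 1) ((path.length:Int))) - 1).toNat = (min (depth + 1) ((path.length:Int))).toNat - 1 := by omega
      simp only [hh1, hh2, pvQuantB]
    · -- from_end = true
      simp only [if_true]
      rw [pvFoldA]
      have hkk : some (-min (depth + 1) ((path.length:Int))) = some (-(((min (depth + 1) ((path.length:Int))).toNat:Nat):Int)) := by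
        congr 1
        omega
      rw [hkk, PySem.List.slice_from_neg_natCast path _ (by omega)]
      obtain ⟨hhead, hlast⟩ := pvEndpointsRev path (path.length - (min (depth + 1) ((path.length:Int))).toNat) (by omega)
      rw [hhead, hlast]
      have e1 : (-1 : Int) = -((1:Nat) : Int) := by norm_num
      have e2 : -min (depth + 1) ((path.length:Int)) = -(((min (depth + 1) ((path.length:Int))).toNat : Nat) : Int) := by omega
      rw [e1, PySem.List.pyGetD_neg_natCast path 1 ((0:Int),(0:Int),(0:Int)) (by omega) (by omega),
          e2, PySem.List.pyGetD_neg_natCast path _ ((0:Int),(0:Int),(0:Int)) (by omega) (by omega)]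
      simp only [pvQuantB, Nat.cast_one]
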